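-- pv_equiv track=rewrite | github.com/ShapeLayer/training | tasks/online_judge/baekjoon/python/21921.py | compute
-- ===== SOURCE A (Python) =====
-- def compute(n: int, x: int, daily: list[int]) -> tuple[int]:
--     max_daily, repeats = sum(daily[0:x]), 1
--     _range = max_daily
--     for l in range(n - x):
--         _range += daily[l + x] - daily[l]
--         if max_daily < _range:
--             max_daily = _range
--             repeats = 1
--         elif max_daily == _range:
--             repeats += 1
--     return max_daily, repeats
-- ===== SOURCE B (Python) =====
-- def compute(n: int, x: int, daily: list[int]) -> tuple[int]:
--     prefix = [0]
--     for v in daily: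
--         prefix.append(prefix[-1] + v)
--     w = max(0, min(x, len(daily)))
--     best, repeats = prefix[w], 1
--     for s in range(1, n - x + 1):
--         cur = prefix[s + x] - prefix[s]
--         if cur > best:
--             best, repeats = cur, 1
--         elif cur == best:
--             repeats += 1
--     return best, repeats
-- ===== Notes on version B (the rewrite author's own statement) =====
-- stated objective: alternative
-- what changed: Replaces A's incremental sliding-window update (carrying a running window sum adjusted by daily[l+x]-daily[l]) with a prefix-sum array built once, each window sum computed independently as prefix[s+x]-prefix[s].
-- outside the precondition, e.g. on compute(0, -1, [5]): A returns (0, 2), B returns (0, 1); on compute(3, 1, [7]): A raises IndexError, B raises IndexError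
import Mathlib
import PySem

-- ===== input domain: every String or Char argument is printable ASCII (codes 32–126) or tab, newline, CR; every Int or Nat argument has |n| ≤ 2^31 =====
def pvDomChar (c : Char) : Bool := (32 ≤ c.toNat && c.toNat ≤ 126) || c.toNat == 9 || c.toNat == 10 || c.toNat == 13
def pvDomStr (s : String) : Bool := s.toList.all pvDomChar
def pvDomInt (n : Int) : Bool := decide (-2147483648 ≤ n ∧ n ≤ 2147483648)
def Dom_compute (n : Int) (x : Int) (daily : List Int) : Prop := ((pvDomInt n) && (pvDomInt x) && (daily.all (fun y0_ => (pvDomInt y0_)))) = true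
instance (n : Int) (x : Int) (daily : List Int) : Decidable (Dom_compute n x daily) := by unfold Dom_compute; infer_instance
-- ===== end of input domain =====

-- B replaces A's incremental sliding-window update with a prefix-sum array and
-- per-window subtraction (alternative decomposition, same O(n) cost).

-- ===== PORT A =====
def compute (n : Int) (x : Int) (daily : List Int) : Int × Int :=
  let init := (PySem.List.slice daily (some 0) (some x)).sum
  let st := (PySem.List.pyRange 0 (n - x) 1).foldl
    (fun (st : Int × Int × Int) l =>
      let r := st.2.2 + PySem.List.pyGetD daily (l + x) 0 - PySem.List.pyGetD daily l 0
      if st.1 < r then (r, 1, r)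
      else if st.1 = r then (st.1, st.2.1 + 1, r)
      else (st.1, st.2.1, r)) (init, 1, init)
  (st.1, st.2.1)

-- ===== PORT B =====
def compute_alt (n : Int) (x : Int) (daily : List Int) : Int × Int :=
  let pfx := daily.foldl (fun (p : List Int) v => p ++ [PySem.List.pyGetD p (-1) 0 + v]) [0]
  let w := max 0 (min x (PySem.List.len daily))
  (PySem.List.pyRange 1 (n - x + 1) 1).foldl
    (fun (st : Int × Int) s =>
      let cur := PySem.List.pyGetD pfx (s + x) 0 - PySem.List.pyGetD pfx s 0
      if st.1 < cur then (cur, 1)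
      else if cur = st.1 then (st.1, st.2 + 1)
      else st) (PySem.List.pyGetD pfx w 0, 1)

-- ===== PRECONDITION & SPEC =====
-- Pre_ excludes x < 0 (where A's value comes from Python's negative-slice/negative-index
-- wraparound, an artefact of A's implementation) and the case x < n ∧ daily.length < n
-- (where A raises IndexError); on everything else A returns normally and is matched.
def Pre_compute (n : Int) (x : Int) (daily : List Int) : Prop :=
  0 ≤ x ∧ (n ≤ x ∨ n ≤ (daily.length : Int))
instance (n : Int) (x : Int) (daily : List Int) : Decidable (Pre_compute n x daily) := by
  unfold Pre_compute; infer_instance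

def pvWitness_compute : Int × Int × List Int := (3, 2, [1, 2, 3])

def Spec_compute (n : Int) (x : Int) (daily : List Int) (out : Int × Int) : Prop := out = compute_alt n x daily
instance (n : Int) (x : Int) (daily : List Int) (out : Int × Int) : Decidable (Spec_compute n x daily out) := by unfold Spec_compute; infer_instance

-- ===== CLAIM (what is proved, stated in full; the proofs are below) =====
def Claim_equal_compute : Prop := ∀ (n : Int) (x : Int) (daily : List Int), Dom_compute n x daily → Pre_compute n x daily → Spec_compute n x daily (compute n x daily)

-- ===== LEMMAS AND PROOFS =====

/-- Partial sums of the first `j` elements. -/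
def pvS (daily : List Int) (j : Nat) : Int := (daily.take j).sum

/-- The tail of B's prefix list: running sums starting from `c`. -/
def pvScan (c : Int) : List Int → List Int
  | [] => []
  | d :: ds => (c + d) :: pvScan (c + d) ds

lemma pvFold_prefix (ds : List Int) : ∀ (pre : List Int) (c : Int),
    ds.foldl (fun (p : List Int) v => p ++ [PySem.List.pyGetD p (-1) 0 + v]) (pre ++ [c])
      = pre ++ c :: pvScan c ds := by
  induction ds with
  | nil => intro pre c; simp [pvScan]
  | cons d ds ih =>
    intro pre c
    simp only [List.foldl_cons, PySem.List.pyGetD_neg_one_append_singleton]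
    rw [ih (pre ++ [c]) (c + d)]
    simp [pvScan]

lemma pvScan_getD (ds : List Int) : ∀ (c : Int) (k : Nat), k < ds.length →
    (pvScan c ds).getD k 0 = c + (ds.take (k + 1)).sum := by
  induction ds with
  | nil => intro c k h; simp at h
  | cons d ds ih =>
    intro c k h
    cases k with
    | zero => simp [pvScan]
    | succ k =>
      simp only [pvScan, List.getD_cons_succ, List.take_succ_cons, List.sum_cons]
      rw [ih (c + d) k (by simpa using h)]
      ring

lemma pvPrefix_getD (daily : List Int) (j : Nat) (hj : j ≤ daily.length) :
    (0 :: pvScan 0 daily).getD j 0 = pvS daily j := by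
  cases j with
  | zero => simp [pvS]
  | succ j =>
    simp only [List.getD_cons_succ]
    rw [pvScan_getD daily 0 j (by omega)]
    simp [pvS]

lemma pvS_succ (daily : List Int) (m : Nat) (h : m < daily.length) :
    pvS daily (m + 1) = pvS daily m + daily.getD m 0 := by
  unfold pvS
  rw [List.sum_take_succ daily m h, List.getD_eq_getElem daily 0 h]

/-- A's loop step on natural indices. -/
def pvStepA (X : Nat) (daily : List Int) (st : Int × Int × Int) (k : Nat) : Int × Int × Int :=
  let r := st.2.2 + daily.getD (k + X) 0 - daily.getD k 0
  if st.1 < r then (r, 1, r) else if st.1 = r then (st.1, st.2.1 + 1, r) else (st.1, st.2.1, r)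

/-- B's loop step on natural indices, with window sums written via `pvS`. -/
def pvStepB (X : Nat) (daily : List Int) (st : Int × Int) (k : Nat) : Int × Int :=
  let cur := pvS daily (k + 1 + X) - pvS daily (k + 1)
  if st.1 < cur then (cur, 1) else if cur = st.1 then (st.1, st.2 + 1) else st

lemma pvMain (X : Nat) (daily : List Int) :
    ∀ (N : Nat), N + X ≤ daily.length → ∀ (m r : Int),
    (List.range N).foldl (pvStepA X daily) (m, r, pvS daily X) =
      (((List.range N).foldl (pvStepB X daily) (m, r)).1,
       ((List.range N).foldl (pvStepB X daily) (m, r)).2,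
       pvS daily (N + X) - pvS daily N) := by
  intro N
  induction N with
  | zero => intro _ m r; simp [pvS]
  | succ N ih =>
    intro hN m r
    have hN' : N + X ≤ daily.length := by omega
    simp only [List.range_succ, List.foldl_append, List.foldl_cons, List.foldl_nil]
    rw [ih hN' m r]
    set q := (List.range N).foldl (pvStepB X daily) (m, r) with hq
    have hr : pvS daily (N + X) - pvS daily N + daily.getD (N + X) 0 - daily.getD N 0
        = pvS daily (N + 1 + X) - pvS daily (N + 1) := by
      have h1 : pvS daily (N + X + 1) = pvS daily (N + X) + daily.getD (N + X) 0 :=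
        pvS_succ daily (N + X) (by omega)
      have h2 : pvS daily (N + 1) = pvS daily N + daily.getD N 0 :=
        pvS_succ daily N (by omega)
      have h3 : N + 1 + X = N + X + 1 := by omega
      rw [h3, h1, h2]; ring
    simp only [pvStepA, pvStepB, hr]
    by_cases h1 : q.1 < pvS daily (N + 1 + X) - pvS daily (N + 1)
    · simp [h1]
    · by_cases h2 : q.1 = pvS daily (N + 1 + X) - pvS daily (N + 1)
      · simp [h2]
      · have h2' : ¬(pvS daily (N + 1 + X) - pvS daily (N + 1) = q.1) := fun h => h2 h.symm
        simp [h1, h2, h2']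

lemma pvS_min (daily : List Int) (X : Nat) :
    pvS daily (min X daily.length) = pvS daily X := by
  rcases le_total X daily.length with h | h
  · rw [min_eq_left h]
  · rw [min_eq_right h]
    simp [pvS, List.take_of_length_le h]

-- ===== VERDICT (by name: the statement is the Claim_ definition above) =====
theorem compute_spec : Claim_equal_compute := by
  intro n x daily _ hpre
  obtain ⟨hx, hor⟩ := hpre
  unfold Spec_compute compute compute_alt
  dsimp only
  set X := x.toNat with hX
  have hxX : x = (X : Int) := by omega
  -- A's initial slice sum
  have hinit : (PySem.List.slice daily (some 0) (some x)).sum = pvS daily X := by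
    rw [hxX, PySem.List.slice_zero_start, PySem.List.slice_to_natCast]
    simp [pvS]
  -- B's prefix list
  have hpfx : daily.foldl (fun (p : List Int) v => p ++ [PySem.List.pyGetD p (-1) 0 + v]) [0]
      = 0 :: pvScan 0 daily := by
    have := pvFold_prefix daily [] 0
    simpa using this
  rw [hinit, hpfx]
  -- B's seed value
  have hw : max 0 (min x (PySem.List.len daily)) = ((min X daily.length : Nat) : Int) := by
    simp only [PySem.List.len_eq]
    omega
  have hseed : PySem.List.pyGetD (0 :: pvScan 0 daily) (max 0 (min x (PySem.List.len daily))) 0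
      = pvS daily X := by
    rw [hw, PySem.List.pyGetD_natCast]
    rw [pvPrefix_getD daily _ (by omega)]
    exact pvS_min daily X
  rw [hseed]
  rcases le_or_gt n x with hnx | hxn
  · -- no loop iterations on either side
    rw [PySem.List.pyRange_one_eq_nil (by omega), PySem.List.pyRange_one_eq_nil (by omega)]
    simp
  · -- x < n, hence n ≤ daily.length
    have hlen : n ≤ (daily.length : Int) := by
      rcases hor with h | h
      · omega
      · exact h
    set N := (n - x).toNat with hNdef
    have hNX : N + X ≤ daily.length := by omega
    -- A's loop as a fold over List.range N
    have hrngA := PySem.List.pyRange_one 0 (n - x)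
    have hrngB := PySem.List.pyRange_one 1 (n - x + 1)
    have hNB : (n - x + 1 - 1).toNat = N := by omega
    rw [hNB] at hrngB
    rw [hrngA, hrngB, List.foldl_map, List.foldl_map]
    -- A's step coincides with pvStepA everywhere
    have hA : (fun (st : Int × Int × Int) (k : Nat) =>
        (fun (st : Int × Int × Int) l =>
          let r := st.2.2 + PySem.List.pyGetD daily (l + x) 0 - PySem.List.pyGetD daily l 0
          if st.1 < r then (r, 1, r)
          else if st.1 = r then (st.1, st.2.1 + 1, r)
          else (st.1, st.2.1, r)) st ((0 : Int) + k))
        = pvStepA X daily := by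
      funext st k
      have h1 : ((k : Nat) : Int) + x = ((k + X : Nat) : Int) := by omega
      have h2 : (0 : Int) + k = ((k : Nat) : Int) := by omega
      simp only [h2, h1, PySem.List.pyGetD_natCast, pvStepA]
    rw [hA]
    -- B's step coincides with pvStepB on the range elements
    have hB : (List.range N).foldl (fun (st : Int × Int) (k : Nat) =>
        (fun (st : Int × Int) s =>
          let cur := PySem.List.pyGetD (0 :: pvScan 0 daily) (s + x) 0
                     - PySem.List.pyGetD (0 :: pvScan 0 daily) s 0
          if st.1 < cur then (cur, 1)
          else if cur = st.1 then (st.1, st.2 + 1)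
          else st) st ((1 : Int) + k)) (pvS daily X, 1)
        = (List.range N).foldl (pvStepB X daily) (pvS daily X, 1) := by
      apply PySem.List.foldl_congr_mem
      intro st k hk
      have hkN : k < N := List.mem_range.mp hk
      have h1 : ((k + 1 : Nat) : Int) + x = ((k + 1 + X : Nat) : Int) := by omega
      have h2 : (1 : Int) + k = ((k + 1 : Nat) : Int) := by omega
      simp only [h2, h1, PySem.List.pyGetD_natCast]
      rw [pvPrefix_getD daily (k + 1 + X) (by omega), pvPrefix_getD daily (k + 1) (by omega)]
      rfl
    have hNA : (n - x - 0).toNat = N := by omega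
    rw [hNA, hB, pvMain X daily N hNX (pvS daily X) 1]
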